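-- pv_equiv track=rewrite | github.com/xPyD-hub/xPyD-sim | src/xpyd_sim/common/helpers.py | render_dummy_text
-- ===== SOURCE A (Python) =====
-- DUMMY_TOKENS = ("The quick brown fox jumps over the lazy dog. " * 20).split()
--
-- def render_dummy_text(n_tokens: int) -> str:
--     if n_tokens <= 0:
--         return ""
--     if n_tokens <= len(DUMMY_TOKENS):
--         return " ".join(DUMMY_TOKENS[:n_tokens])
--     # Cycle through DUMMY_TOKENS to produce enough tokens
--     tokens: list[str] = []
--     pool_len = len(DUMMY_TOKENS)
--     for i in range(n_tokens):
--         tokens.append(DUMMY_TOKENS[i % pool_len])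
--     return " ".join(tokens)
-- ===== SOURCE B (Python) =====
-- DUMMY_TOKENS = ("The quick brown fox jumps over the lazy dog. " * 20).split()
--
-- def render_dummy_text(n_tokens: int) -> str:
--     # replicate the pool enough times, truncate, join: one expression, no branches
--     return " ".join((DUMMY_TOKENS * (n_tokens // len(DUMMY_TOKENS) + 1))[:n_tokens])
-- ===== Notes on version B (the rewrite author's own statement) =====
-- stated objective: simpler
-- what changed: A's three branches (empty guard, short-prefix join, per-index modulo loop) are replaced by a single replicate-and-truncate expression: the token pool is repeated enough times, sliced to the requested length and joined.
import Mathlib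
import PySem

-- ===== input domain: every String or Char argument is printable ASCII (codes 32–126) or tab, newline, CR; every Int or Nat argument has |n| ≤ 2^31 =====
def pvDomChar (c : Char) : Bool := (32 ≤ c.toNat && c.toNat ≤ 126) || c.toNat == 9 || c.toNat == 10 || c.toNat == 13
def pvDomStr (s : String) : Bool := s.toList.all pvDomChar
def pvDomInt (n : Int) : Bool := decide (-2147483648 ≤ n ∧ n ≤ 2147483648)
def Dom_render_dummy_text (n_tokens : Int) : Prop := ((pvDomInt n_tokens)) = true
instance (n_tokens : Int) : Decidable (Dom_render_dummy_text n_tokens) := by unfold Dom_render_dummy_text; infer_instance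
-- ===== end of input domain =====

-- B replaces A's three branches (empty guard, short-prefix join, per-index modulo loop)
-- by one replicate-and-truncate expression; same return value, same O(n) cost.

-- ===== PORT A =====
-- DUMMY_TOKENS = ("The quick brown fox jumps over the lazy dog. " * 20).split()
-- i.e. the 9 words of the sentence, repeated 20 times (180 tokens).
def dummySentence : List String :=
  ["The", "quick", "brown", "fox", "jumps", "over", "the", "lazy", "dog."]
def DUMMY_TOKENS : List String := (List.replicate 20 dummySentence).flatten

def render_dummy_text (n_tokens : Int) : String :=
  if n_tokens ≤ 0 then ""
  else if n_tokens ≤ PySem.List.len DUMMY_TOKENS then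
    PySem.Str.join " " (PySem.List.slice DUMMY_TOKENS none (some n_tokens))
  else
    -- tokens = []; for i in range(n_tokens): tokens.append(DUMMY_TOKENS[i % pool_len])
    PySem.Str.join " "
      ((PySem.List.pyRange 0 n_tokens 1).foldl
        (fun acc i =>
          acc ++ [PySem.List.pyGetD DUMMY_TOKENS (PySem.Int.mod i (PySem.List.len DUMMY_TOKENS)) ""]) [])

-- ===== PORT B =====
-- " ".join((DUMMY_TOKENS * (n_tokens // len(DUMMY_TOKENS) + 1))[:n_tokens])
def render_dummy_text_alt (n_tokens : Int) : String :=
  PySem.Str.join " "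
    (PySem.List.slice
      (PySem.List.pyRepeat DUMMY_TOKENS
        (PySem.Int.floordiv n_tokens (PySem.List.len DUMMY_TOKENS) + 1))
      none (some n_tokens))

-- ===== PRECONDITION & SPEC =====
def Spec_render_dummy_text (n_tokens : Int) (out : String) : Prop := out = render_dummy_text_alt n_tokens
instance (n_tokens : Int) (out : String) : Decidable (Spec_render_dummy_text n_tokens out) := by unfold Spec_render_dummy_text; infer_instance

-- ===== CLAIM (what is proved, stated in full; the proofs are below) =====
def Claim_equal_render_dummy_text : Prop := ∀ (n_tokens : Int), Dom_render_dummy_text n_tokens → Spec_render_dummy_text n_tokens (render_dummy_text n_tokens)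

-- ===== LEMMAS AND PROOFS =====

set_option maxRecDepth 8192 in
lemma dummy_length : DUMMY_TOKENS.length = 180 := by decide

-- the j-th element of L repeated k times is L[j % len]
lemma flatten_replicate_getElem? {α : Type} (L : List α) (k j : Nat)
    (hj : j < k * L.length) :
    ((List.replicate k L).flatten)[j]? = L[j % L.length]? := by
  induction k generalizing j with
  | zero => omega
  | succ k ih =>
    rw [List.replicate_succ, List.flatten_cons]
    by_cases h : j < L.length
    · rw [List.getElem?_append_left h, Nat.mod_eq_of_lt h]
    · push Not at h
      rw [List.getElem?_append_right h, Nat.mod_eq_sub_mod h]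
      have h2 : (k+1) * L.length = k * L.length + L.length := by ring
      exact ih _ (by omega)

lemma flatten_replicate_length {α : Type} (L : List α) (k : Nat) :
    ((List.replicate k L).flatten).length = k * L.length := by
  simp [List.length_flatten]

-- core identity: indexing by modulo over range m = replicate enough and truncate
lemma tokens_eq (m : Nat) :
    (List.range m).map (fun k => DUMMY_TOKENS.getD (k % 180) "") =
      ((List.replicate (m / 180 + 1) DUMMY_TOKENS).flatten).take m := by
  apply List.ext_getElem?
  intro j
  have hlen : DUMMY_TOKENS.length = 180 := dummy_length
  have htot : ((List.replicate (m / 180 + 1) DUMMY_TOKENS).flatten).length = (m / 180 + 1) * 180 := by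
    rw [flatten_replicate_length, hlen]
  have hm : m < (m / 180 + 1) * 180 := by
    have hdm := Nat.div_add_mod m 180
    have hmod : m % 180 < 180 := Nat.mod_lt _ (by norm_num)
    have hmul : (m / 180 + 1) * 180 = m / 180 * 180 + 180 := by ring
    omega
  by_cases hj : j < m
  · rw [List.getElem?_take_of_lt hj, List.getElem?_map, List.getElem?_range hj,
        flatten_replicate_getElem? _ _ _ (by rw [hlen]; omega), hlen]
    have hjm : j % 180 < 180 := Nat.mod_lt _ (by norm_num)
    simp [List.getElem?_eq_getElem (by omega : j % 180 < DUMMY_TOKENS.length),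
          List.getD_eq_getElem?_getD]
  · push Not at hj
    rw [List.getElem?_eq_none (by simpa using hj),
        List.getElem?_eq_none (by simp [List.length_take]; omega)]

-- ===== VERDICT (by name: the statement is the Claim_ definition above) =====
theorem render_dummy_text_spec : Claim_equal_render_dummy_text := by
  intro n _
  unfold Spec_render_dummy_text render_dummy_text render_dummy_text_alt
  have hlen : DUMMY_TOKENS.length = 180 := dummy_length
  have hlenI : PySem.List.len DUMMY_TOKENS = (180 : Int) := by
    simp [PySem.List.len_eq, dummy_length]
  simp only [hlenI]
  have hfd : PySem.Int.floordiv n 180 = n / 180 := by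
    show n.fdiv 180 = n / 180
    rw [Int.fdiv_eq_ediv]; simp
  rw [hfd]
  by_cases h0 : n ≤ 0
  · rw [if_pos h0]
    -- B: the repeated pool is sliced to a nonpositive bound (or is empty): empty token list
    rcases lt_or_eq_of_le h0 with hlt | heq
    · have : (n / 180 + 1).toNat = 0 := by omega
      rw [PySem.List.pyRepeat, this]
      simp [PySem.List.slice]
      rfl
    · subst heq
      rw [PySem.List.slice_to _ (le_refl 0)]
      simp
      rfl
  · rw [if_neg h0]
    push Not at h0
    obtain ⟨m, rfl⟩ : ∃ m : Nat, n = (m : Int) := ⟨n.toNat, by omega⟩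
    have hdiv : ((m : Int) / 180 + 1).toNat = m / 180 + 1 := by omega
    by_cases h1 : (m : Int) ≤ 180
    · rw [if_pos h1, PySem.List.pyRepeat, hdiv,
          PySem.List.slice_to DUMMY_TOKENS (by positivity),
          PySem.List.slice_to _ (by positivity), Int.toNat_natCast]
      -- take m of L ++ rest = take m of L
      have : (List.replicate (m / 180 + 1) DUMMY_TOKENS).flatten =
          DUMMY_TOKENS ++ (List.replicate (m / 180) DUMMY_TOKENS).flatten := by
        rw [List.replicate_succ, List.flatten_cons]
      rw [this, List.take_append_of_le_length (by omega)]
    · rw [if_neg h1, PySem.List.pyRepeat, hdiv,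
          PySem.List.slice_to _ (by positivity), Int.toNat_natCast]
      push Not at h1
      congr 1
      rw [PySem.List.foldl_append_singleton_eq_map, List.nil_append,
          PySem.List.pyRange_one]
      rw [List.map_map]
      simp only [Int.sub_zero, Int.toNat_natCast]
      rw [← tokens_eq]
      apply List.map_congr_left
      intro k hk
      show PySem.List.pyGetD DUMMY_TOKENS (PySem.Int.mod (0 + (k:Int)) 180) "" = _
      have : PySem.Int.mod (0 + (k:Int)) 180 = ((k % 180 : Nat) : Int) := by
        show ((0:Int) + k).fmod 180 = _
        rw [Int.fmod_eq_emod]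
        push_cast
        simp
      rw [this, PySem.List.pyGetD_natCast]
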